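-- pv_equiv track=rewrite | github.com/M-Sieger/mpesa-recon | server/app/services/pdf_service.py | _resolve_parsing_method
-- ===== SOURCE A (Python) =====
-- from typing import Any, Dict, Iterable, Iterator, List, Optional, Sequence, Tuple
--
-- def _resolve_parsing_method(page_methods: Sequence[str]) -> str:
--     if not page_methods:
--         return "unknown"
--     unique_methods = {method for method in page_methods if method}
--     if not unique_methods:
--         return "unknown"
--     if len(unique_methods) == 1:
--         return unique_methods.pop()
--     return "mixed"
-- ===== SOURCE B (Python) =====
-- def _resolve_parsing_method(page_methods):
--     found = None
--     for method in page_methods: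
--         if not method:
--             continue
--         if found is None:
--             found = method
--         elif method != found:
--             return "mixed"
--     return "unknown" if found is None else found
-- ===== Notes on version B (the rewrite author's own statement) =====
-- stated objective: simpler
-- what changed: B replaces the materialized set of unique methods and its length test by a single one-pass scan holding one scalar sentinel, returning "mixed" the moment a second distinct non-empty method appears.
import Mathlib
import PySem

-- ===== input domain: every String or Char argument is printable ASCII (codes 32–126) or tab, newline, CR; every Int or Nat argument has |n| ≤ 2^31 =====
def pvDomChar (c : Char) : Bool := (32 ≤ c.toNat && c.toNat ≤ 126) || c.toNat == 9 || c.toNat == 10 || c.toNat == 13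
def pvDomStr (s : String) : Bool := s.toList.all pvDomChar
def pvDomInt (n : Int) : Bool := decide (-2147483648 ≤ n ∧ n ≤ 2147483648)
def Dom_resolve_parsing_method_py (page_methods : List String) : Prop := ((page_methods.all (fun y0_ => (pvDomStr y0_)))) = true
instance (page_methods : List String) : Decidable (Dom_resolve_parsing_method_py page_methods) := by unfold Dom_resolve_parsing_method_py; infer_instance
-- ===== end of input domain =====

-- B replaces A's materialized set of unique methods by a one-pass scan with a single scalar sentinel and early exit; objective: simpler.

-- ===== PORT A =====
def resolve_parsing_method_py (page_methods : List String) : String :=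
  if page_methods.isEmpty then "unknown"
  else
    -- {method for method in page_methods if method}
    let unique_methods : PySem.Set String :=
      PySem.Set.ofList (page_methods.filter (fun method => !(method == "")))
    if unique_methods.length = 0 then "unknown"
    else if unique_methods.length = 1 then
      -- unique_methods.pop() on a singleton set is its only element
      unique_methods.headD ""
    else "mixed"

-- ===== PORT B =====
-- the for-loop of Source B, carrying `found : Option String`; returning "mixed" = Python's early return
def resolve_parsing_method_py_altLoop (found : Option String) : List String → String
  | [] => match found with
          | none => "unknown"
          | some f => f
  | method :: rest =>
    if method == "" then resolve_parsing_method_py_altLoop found rest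
    else match found with
         | none => resolve_parsing_method_py_altLoop (some method) rest
         | some f => if method != f then "mixed"
                     else resolve_parsing_method_py_altLoop found rest

def resolve_parsing_method_py_alt (page_methods : List String) : String :=
  resolve_parsing_method_py_altLoop none page_methods

-- ===== PRECONDITION & SPEC =====
def Spec_resolve_parsing_method_py (page_methods : List String) (out : String) : Prop := out = resolve_parsing_method_py_alt page_methods
instance (page_methods : List String) (out : String) : Decidable (Spec_resolve_parsing_method_py page_methods out) := by unfold Spec_resolve_parsing_method_py; infer_instance

-- ===== CLAIM (what is proved, stated in full; the proofs are below) =====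
def Claim_equal_resolve_parsing_method_py : Prop := ∀ (page_methods : List String), Dom_resolve_parsing_method_py page_methods → Spec_resolve_parsing_method_py page_methods (resolve_parsing_method_py page_methods)

-- ===== LEMMAS AND PROOFS =====

-- skipping falsy entries = looping over the filtered list
theorem altLoop_filter (found : Option String) (l : List String) :
    resolve_parsing_method_py_altLoop found l
      = resolve_parsing_method_py_altLoop found (l.filter (fun m => !(m == ""))) := by
  induction l generalizing found with
  | nil => rfl
  | cons m rest ih =>
    by_cases hm : m = ""
    · subst hm
      simp [resolve_parsing_method_py_altLoop, List.filter, ih]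
    · have hb : (m == "") = false := by simpa using hm
      cases found with
      | none => simp [resolve_parsing_method_py_altLoop, List.filter, hb, ih]
      | some f => simp [resolve_parsing_method_py_altLoop, List.filter, hb, ih]

theorem altLoop_some (k : List String) (f : String) (hne : ∀ x ∈ k, x ≠ "") :
    resolve_parsing_method_py_altLoop (some f) k
      = if k.all (fun x => x == f) then f else "mixed" := by
  induction k with
  | nil => rfl
  | cons m rest ih =>
    have hm : (m == "") = false := by
      simpa using hne m List.mem_cons_self
    have ih' := ih (fun x hx => hne x (List.mem_cons_of_mem _ hx))
    by_cases hmf : m = f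
    · subst hmf
      simp [resolve_parsing_method_py_altLoop, hm, ih']
    · have hbf : (m == f) = false := by simpa using hmf
      simp [resolve_parsing_method_py_altLoop, hm, hbf, hmf]

theorem foldl_add_append (l s : List String) :
    ∃ t, l.foldl PySem.Set.add s = s ++ t := by
  induction l generalizing s with
  | nil => exact ⟨[], by simp⟩
  | cons x l ih =>
    rw [List.foldl_cons]
    rcases ih (PySem.Set.add s x) with ⟨t, ht⟩
    by_cases hx : x ∈ s
    · exact ⟨t, by rw [ht]; simp [PySem.Set.add, hx]⟩
    · exact ⟨x :: t, by rw [ht]; simp [PySem.Set.add, hx]⟩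

theorem mem_foldl_add_of_mem : ∀ (l s : List String) (x : String), x ∈ l →
    x ∈ l.foldl PySem.Set.add s := by
  intro l
  induction l with
  | nil => intro s x hx; cases hx
  | cons y l ih =>
    intro s x hx
    rw [List.foldl_cons]
    rcases List.mem_cons.mp hx with h | h
    · subst h
      rcases foldl_add_append l (PySem.Set.add s x) with ⟨t, ht⟩
      rw [ht]
      by_cases hc : x ∈ s <;> simp [PySem.Set.add, hc]
    · exact ih _ x h

theorem foldl_add_const (l : List String) (m : String)
    (h : ∀ x ∈ l, x = m) : l.foldl PySem.Set.add [m] = [m] := by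
  induction l with
  | nil => rfl
  | cons x l ih =>
    have hx : x = m := h x List.mem_cons_self
    subst hx
    have hstep : PySem.Set.add [x] x = [x] := by simp [PySem.Set.add]
    rw [List.foldl_cons, hstep]
    exact ih (fun y hy => h y (List.mem_cons_of_mem _ hy))

theorem altLoop_none (l : List String) :
    resolve_parsing_method_py_altLoop none (l.filter (fun m => !(m == "")))
      = (if (PySem.Set.ofList (l.filter (fun m => !(m == "")))).length = 0 then "unknown"
         else if (PySem.Set.ofList (l.filter (fun m => !(m == "")))).length = 1 then
           (PySem.Set.ofList (l.filter (fun m => !(m == "")))).headD ""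
         else "mixed") := by
  rcases hk : l.filter (fun m => !(m == "")) with _ | ⟨m, rest⟩
  · rfl
  · have hall : ∀ x ∈ m :: rest, x ≠ "" := by
      intro x hx
      have := List.mem_filter.mp (hk ▸ hx)
      simpa using this.2
    have hm : (m == "") = false := by simpa using hall m List.mem_cons_self
    have hofl : PySem.Set.ofList (m :: rest) = rest.foldl PySem.Set.add [m] := by
      simp [PySem.Set.ofList_eq_foldl, List.foldl_cons, PySem.Set.add]
    have hloop : resolve_parsing_method_py_altLoop none (m :: rest)
        = resolve_parsing_method_py_altLoop (some m) rest := by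
      simp [resolve_parsing_method_py_altLoop, hm]
    rw [hloop, hofl,
      altLoop_some rest m (fun x hx => hall x (List.mem_cons_of_mem _ hx))]
    by_cases hc : ∀ x ∈ rest, x = m
    · have hfold : rest.foldl PySem.Set.add [m] = [m] := foldl_add_const rest m hc
      rw [if_pos (by simpa using hc), hfold]
      simp
    · push Not at hc
      rcases hc with ⟨x, hxmem, hxne⟩
      rw [if_neg (by
        intro hcon
        exact hxne (by simpa using List.all_eq_true.mp hcon x hxmem))]
      have hxin : x ∈ rest.foldl PySem.Set.add [m] := mem_foldl_add_of_mem rest [m] x hxmem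
      rcases foldl_add_append rest [m] with ⟨t, ht⟩
      have hlen2 : 2 ≤ (rest.foldl PySem.Set.add [m]).length := by
        rw [ht]
        rcases t with _ | ⟨y, t⟩
        · exfalso
          rw [ht] at hxin
          simp at hxin
          exact hxne hxin
        · simp
      rw [if_neg (by omega), if_neg (by omega)]

-- ===== VERDICT (by name: the statement is the Claim_ definition above) =====
theorem resolve_parsing_method_py_spec : Claim_equal_resolve_parsing_method_py := by
  intro pm _
  unfold Spec_resolve_parsing_method_py resolve_parsing_method_py resolve_parsing_method_py_alt
  rcases pm with _ | ⟨m, rest⟩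
  · rfl
  · rw [altLoop_filter, altLoop_none]
    simp
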